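-- pv_equiv track=rewrite | github.com/AP-MI-2021/lab-3-CardosVasile999999 | main.py | get_longest_prime_digits
-- ===== SOURCE A (Python) =====
-- def is_cifre_prime(n):
--     '''
--     functie ajutatoare pentru functia get_longest_prime_digits
--     :return: boolean variable
--     '''
--     while n:
--         c=n%10
--         if c==1:
--             return False
--         elif c==4:
--             return False
--         elif c==6:
--             return False
--         elif c==8:
--             return False
--         elif c==9:
--             return False
--         elif c==0:
--             return False
--
--         n=n//10
--
--         return True
--
-- def get_longest_prime_digits(lst: list[int]):
--     '''
--     Problema 13: Functie care determina cea mai lunga subsecventa cu numere care au toate cifrele numere prime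
--     Input: lista de intregi
--     Output: Cea mai lunga subsecventa de cu numere care au toate cifrele numere prime
--     '''
--     n = len(lst)
--     res = []
--     for s in range(n):
--         for d in range(s, n):
--             prim = True
--             for num in lst[s:d + 1]:
--                 if is_cifre_prime(num) == False:
--                     prim = False
--                     break
--             if prim:
--                 if d - s + 1 > len(res):
--                     res = lst[s:d + 1]
--
--     return res
-- ===== SOURCE B (Python) =====
-- def get_longest_prime_digits(lst: list[int]):
--     '''
--     Longest contiguous run of numbers whose units digit is prime,
--     found in a single linear pass (earliest longest run wins).
--     '''
--     best = []
--     cur = []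
--     for x in lst:
--         if x % 10 in (2, 3, 5, 7):
--             cur.append(x)
--             if len(cur) > len(best):
--                 best = cur[:]
--         else:
--             cur = []
--     return best
-- ===== Notes on version B (the rewrite author's own statement) =====
-- stated objective: faster
-- what changed: Replaced A's enumeration of all O(n^2) segments with a per-segment qualification scan by a single linear pass that tracks the current run of units-digit-prime numbers and keeps the earliest longest one.
-- intended difference: On lists containing 0, A treats 0 as qualifying (its helper's while loop never runs for 0 and returns None instead of False), so A may return a run including 0; B rejects 0 since its units digit 0 is not prime, which is the intended behaviour. — e.g. on get_longest_prime_digits([0]): A returns [0], B returns []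
import Mathlib
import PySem

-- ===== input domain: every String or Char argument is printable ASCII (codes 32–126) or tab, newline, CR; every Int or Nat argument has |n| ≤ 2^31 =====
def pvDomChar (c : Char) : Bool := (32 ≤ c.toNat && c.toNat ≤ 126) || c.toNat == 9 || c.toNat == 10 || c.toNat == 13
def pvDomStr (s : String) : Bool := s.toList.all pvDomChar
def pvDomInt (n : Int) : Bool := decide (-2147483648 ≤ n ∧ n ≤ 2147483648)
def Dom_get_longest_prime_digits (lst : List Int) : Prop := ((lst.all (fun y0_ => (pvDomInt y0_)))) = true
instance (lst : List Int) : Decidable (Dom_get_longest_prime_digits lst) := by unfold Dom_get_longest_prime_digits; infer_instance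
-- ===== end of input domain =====

-- B replaces A's O(n^3) all-segments enumeration by a single linear pass tracking the
-- current run of units-digit-prime numbers and keeping the earliest longest one (objective: faster).


-- ===== PORT A =====
-- A's helper: returns True/False/None (None exactly when n == 0, since the while body never runs)
def is_cifre_prime (n : Int) : Option Bool :=
  if n ≠ 0 then
    let c := PySem.Int.mod n 10
    if c = 1 then some false
    else if c = 4 then some false
    else if c = 6 then some false
    else if c = 8 then some false
    else if c = 9 then some false
    else if c = 0 then some false
    else some true
  else none

-- A's inner 'for num in lst[s:d+1]: if is_cifre_prime(num) == False: prim = False; break'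
def primCheck : List Int → Bool
  | [] => true
  | num :: rest => if is_cifre_prime num = some false then false else primCheck rest

def get_longest_prime_digits (lst : List Int) : List Int :=
  let n : Int := lst.length
  (PySem.List.pyRange 0 n 1).foldl (fun res s =>
    (PySem.List.pyRange s n 1).foldl (fun res d =>
      if primCheck (PySem.List.slice lst (some s) (some (d + 1))) then
        if d - s + 1 > (res.length : Int) then PySem.List.slice lst (some s) (some (d + 1)) else res
      else res) res) []

-- ===== PORT B =====
def unitsPrime (n : Int) : Bool :=
  let r := PySem.Int.mod n 10
  decide (r = 2) || decide (r = 3) || decide (r = 5) || decide (r = 7)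

def get_longest_prime_digits_alt (lst : List Int) : List Int :=
  (lst.foldl (fun (st : List Int × List Int) x =>
    if unitsPrime x then
      let cur' := st.2 ++ [x]
      (if cur'.length > st.1.length then cur' else st.1, cur')
    else (st.1, [])) ([], [])).1

-- ===== PRECONDITION & SPEC =====
-- On lists containing 0, A treats 0 as qualifying (its helper's while loop never runs for 0
-- and returns None instead of False), so A may return a run including 0; B rejects 0 since
-- its units digit 0 is not prime, which is the intended behaviour.
def D_get_longest_prime_digits (lst : List Int) : Prop := (0 : Int) ∈ lst
instance (lst : List Int) : Decidable (D_get_longest_prime_digits lst) := by unfold D_get_longest_prime_digits; infer_instance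

def Spec_get_longest_prime_digits (lst : List Int) (out : List Int) : Prop :=
  ¬ D_get_longest_prime_digits lst → out = get_longest_prime_digits_alt lst
instance (lst : List Int) (out : List Int) : Decidable (Spec_get_longest_prime_digits lst out) := by unfold Spec_get_longest_prime_digits; infer_instance

def pvDiffWitness_get_longest_prime_digits : List Int := [0]
def pvDiffWitnessOut_get_longest_prime_digits : (List Int) × (List Int) := ([0], [])

-- ===== CLAIM (what is proved, stated in full; the proofs are below) =====
def Claim_unchanged_get_longest_prime_digits : Prop := ∀ (lst : List Int), Dom_get_longest_prime_digits lst → Spec_get_longest_prime_digits lst (get_longest_prime_digits lst)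
def Claim_changed_get_longest_prime_digits : Prop := Dom_get_longest_prime_digits (pvDiffWitness_get_longest_prime_digits) ∧ D_get_longest_prime_digits (pvDiffWitness_get_longest_prime_digits) ∧ get_longest_prime_digits (pvDiffWitness_get_longest_prime_digits) = pvDiffWitnessOut_get_longest_prime_digits.1 ∧ get_longest_prime_digits_alt (pvDiffWitness_get_longest_prime_digits) = pvDiffWitnessOut_get_longest_prime_digits.2 ∧ pvDiffWitnessOut_get_longest_prime_digits.1 ≠ pvDiffWitnessOut_get_longest_prime_digits.2

-- ===== LEMMAS AND PROOFS =====

-- A's effective qualification predicate: 0 or a prime units digit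
def okA (n : Int) : Bool := decide (n = 0) || unitsPrime n

-- 'earliest longest' selection: keep a, replace it by b only when b is strictly longer
def sel (a b : List Int) : List Int := if a.length < b.length then b else a

-- the earliest longest p-run of a list, by structural recursion over suffixes
def can (p : Int → Bool) : List Int → List Int
  | [] => []
  | x :: xs => sel (List.takeWhile p (x :: xs)) (can p xs)

theorem icp_eq (n : Int) : (is_cifre_prime n = some false) ↔ okA n = false := by
  by_cases h0 : n = 0
  · subst h0; simp [is_cifre_prime, okA]
  · have h1 : 0 ≤ n % 10 := Int.emod_nonneg n (by norm_num)
    have h2 : n % 10 < 10 := Int.emod_lt_of_pos n (by norm_num)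
    have h : n % 10 = 0 ∨ n % 10 = 1 ∨ n % 10 = 2 ∨ n % 10 = 3 ∨ n % 10 = 4 ∨ n % 10 = 5 ∨
        n % 10 = 6 ∨ n % 10 = 7 ∨ n % 10 = 8 ∨ n % 10 = 9 := by omega
    rcases h with h|h|h|h|h|h|h|h|h|h <;> simp [is_cifre_prime, okA, unitsPrime, h0, h]

theorem primCheck_eq_all (l : List Int) : primCheck l = l.all okA := by
  induction l with
  | nil => rfl
  | cons x xs ih =>
    by_cases h : okA x
    · simp [primCheck, List.all_cons, h, (icp_eq x).not.mpr (by simp [h]), ih]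
    · simp only [Bool.not_eq_true] at h
      simp [primCheck, (icp_eq x).mpr h, List.all_cons, h]

theorem sel_nil_right (a : List Int) : sel a [] = a := by simp [sel]

theorem sel_nil_left (b : List Int) : sel [] b = b := by
  cases b <;> simp [sel]

theorem sel_left_of_le {a b : List Int} (h : b.length ≤ a.length) : sel a b = a := by
  simp [sel, Nat.not_lt.mpr h]

theorem length_sel (a b : List Int) : (sel a b).length = max a.length b.length := by
  unfold sel; split_ifs with h <;> omega

theorem sel_assoc (a b c : List Int) : sel (sel a b) c = sel a (sel b c) := by
  unfold sel; split_ifs <;> first | rfl | omega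

theorem sel_sel_prefix (b u t : List Int) : sel (sel b u) (u ++ t) = sel b (u ++ t) := by
  unfold sel
  rcases t with _ | ⟨y, t⟩
  · simp only [List.append_nil]; split_ifs <;> rfl
  · have h : u.length < (u ++ y :: t).length := by simp
    split_ifs <;> first | rfl | omega

-- v strictly shorter than u is absorbed on the right of u
theorem sel_absorb {u v w : List Int} (h : v.length < u.length) : sel u (sel v w) = sel u w := by
  unfold sel; split_ifs <;> first | rfl | omega

-- first-run decomposition of can
theorem can_decomp (p : Int → Bool) (l : List Int) :
    can p l = sel (l.takeWhile p) (can p (l.drop ((l.takeWhile p).length + 1))) := by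
  induction l with
  | nil => simp [can, sel_nil_left]
  | cons x xs ih =>
    by_cases h : p x
    · rw [show can p (x :: xs) = sel ((x :: xs).takeWhile p) (can p xs) from rfl, ih,
        List.takeWhile_cons_of_pos h, sel_absorb (by simp)]
      simp
    · rw [show can p (x :: xs) = sel ((x :: xs).takeWhile p) (can p xs) from rfl,
        List.takeWhile_cons_of_neg (by simp [h])]
      simp [sel_nil_left]

theorem takeWhile_congr_mem (p q : Int → Bool) (l : List Int) (h : ∀ x ∈ l, p x = q x) :
    l.takeWhile p = l.takeWhile q := by
  induction l with
  | nil => rfl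
  | cons x xs ih =>
    by_cases hx : p x
    · rw [List.takeWhile_cons_of_pos hx, List.takeWhile_cons_of_pos (by rw [← h x (by simp)]; exact hx),
        ih (fun a ha => h a (List.mem_cons_of_mem _ ha))]
    · rw [List.takeWhile_cons_of_neg (by simpa using hx),
        List.takeWhile_cons_of_neg (by rw [← h x (by simp)]; simpa using hx)]

-- can only looks at the predicate's values on members
theorem can_congr (p q : Int → Bool) (l : List Int) (h : ∀ x ∈ l, p x = q x) :
    can p l = can q l := by
  induction l with
  | nil => rfl
  | cons x xs ih =>
    show sel ((x :: xs).takeWhile p) (can p xs) = sel ((x :: xs).takeWhile q) (can q xs)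
    rw [takeWhile_congr_mem p q _ h, ih (fun a ha => h a (List.mem_cons_of_mem _ ha))]

-- ===== B side =====
theorem bfold (l : List Int) : ∀ b c : List Int, c.length ≤ b.length →
    (l.foldl (fun (st : List Int × List Int) x =>
      if unitsPrime x then
        let cur' := st.2 ++ [x]
        (if cur'.length > st.1.length then cur' else st.1, cur')
      else (st.1, [])) (b, c)).1
    = sel (sel b (c ++ l.takeWhile unitsPrime))
        (can unitsPrime (l.drop ((l.takeWhile unitsPrime).length + 1))) := by
  induction l with
  | nil =>
    intro b c hc
    simp [sel_nil_right, sel_left_of_le hc, show can unitsPrime [] = [] from rfl]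
  | cons x xs ih =>
    intro b c hc
    by_cases h : unitsPrime x
    · simp only [List.foldl_cons, h, if_pos]
      rw [show (if (c ++ [x]).length > b.length then c ++ [x] else b) = sel b (c ++ [x]) from rfl]
      rw [ih (sel b (c ++ [x])) (c ++ [x]) (by rw [length_sel]; omega)]
      rw [List.takeWhile_cons_of_pos h]
      have harr : (c ++ [x]) ++ xs.takeWhile unitsPrime = c ++ x :: xs.takeWhile unitsPrime := by
        simp
      rw [← harr, sel_sel_prefix, harr]
      congr 2
    · simp only [List.foldl_cons, h, Bool.false_eq_true, if_neg, not_false_iff]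
      rw [ih b [] (by simp)]
      simp only [List.nil_append]
      rw [sel_assoc, ← can_decomp, List.takeWhile_cons_of_neg (by simp [h])]
      simp [sel_left_of_le hc]

theorem alt_eq_can (lst : List Int) :
    get_longest_prime_digits_alt lst = can unitsPrime lst := by
  unfold get_longest_prime_digits_alt
  rw [bfold lst [] [] (by simp), sel_nil_left, List.nil_append, ← can_decomp]

-- ===== A side =====
theorem all_take_iff (p : Int → Bool) (R : List Int) (m : Nat) (hm : m ≤ R.length) :
    (R.take m).all p = true ↔ m ≤ (R.takeWhile p).length := by
  constructor
  · intro h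
    have h1 : (R.take m).takeWhile p = R.take m :=
      List.takeWhile_eq_self_iff.mpr (by simpa [List.all_eq_true] using h)
    have h2 : (R.take m).takeWhile p = (R.takeWhile p).take m := (List.take_takeWhile ..).symm
    have h3 := congrArg List.length (h1.symm.trans h2)
    simp only [List.length_take] at h3
    omega
  · intro h
    have heq : R.takeWhile p = R.take (R.takeWhile p).length :=
      List.prefix_iff_eq_take.mp (List.takeWhile_prefix p)
    have h4 : R.take m = (R.takeWhile p).take m := by
      rw [heq, List.take_take]; congr 1; omega
    rw [h4]
    have hall := List.all_takeWhile (p := p) (l := R)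
    simp only [List.all_eq_true] at hall ⊢
    exact fun x hx => hall x (List.mem_of_mem_take hx)

theorem sel_step (m : Nat) (u v r : List Int) (hu : u.length = m) (hv : v.length = m + 1) :
    (if ((m : Int) + 1 > ((sel r u).length : Int)) then v else sel r u) = sel r v := by
  unfold sel; split_ifs <;> first | rfl | omega

theorem inner_lemma (lst : List Int) (m : Nat) : ∀ (s : Int) (r0 : List Int), 0 ≤ s →
    s.toNat + m ≤ lst.length →
    (PySem.List.pyRange s (s + (m : Int)) 1).foldl (fun res d =>
      if primCheck (PySem.List.slice lst (some s) (some (d + 1))) then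
        if d - s + 1 > (res.length : Int) then PySem.List.slice lst (some s) (some (d + 1)) else res
      else res) r0
    = sel r0 (((lst.drop s.toNat).takeWhile okA).take m) := by
  induction m with
  | zero =>
    intro s r0 hs hm
    rw [show s + ((0 : Nat) : Int) = s by push_cast; ring, PySem.List.pyRange_one_eq_nil le_rfl]
    simp [sel_nil_right]
  | succ m ih =>
    intro s r0 hs hm
    have hcast : s + ((m + 1 : Nat) : Int) = (s + (m : Int)) + 1 := by push_cast; ring
    rw [hcast, PySem.List.pyRange_one_succ_right (by omega), List.foldl_append,
      List.foldl_cons, List.foldl_nil, ih s r0 hs (by omega)]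
    set R := lst.drop s.toNat with hR
    set T := R.takeWhile okA with hT
    have hRlen : R.length = lst.length - s.toNat := by rw [hR]; simp
    have htn : (s + (m : Int) + 1).toNat - s.toNat = m + 1 := by omega
    have hslice : PySem.List.slice lst (some s) (some (s + (m : Int) + 1)) = R.take (m + 1) := by
      rw [PySem.List.slice_toNat lst (by omega) (by omega), htn]
    rw [hslice, primCheck_eq_all]
    have harith : (s + (m : Int)) - s + 1 = (m : Int) + 1 := by ring
    by_cases hC : (R.take (m + 1)).all okA = true
    · have hk : m + 1 ≤ T.length := (all_take_iff _ _ _ (by omega)).mp hC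
      have hseg : R.take (m + 1) = T.take (m + 1) := by
        rw [hT, List.take_takeWhile,
          List.takeWhile_eq_self_iff.mpr (by simpa [List.all_eq_true] using hC)]
      rw [if_pos hC, hseg, harith]
      exact sel_step m (T.take m) (T.take (m + 1)) r0 (by rw [List.length_take]; omega)
        (by rw [List.length_take]; omega)
    · rw [if_neg hC]
      have hk : T.length ≤ m := by
        by_contra hx
        exact hC ((all_take_iff _ _ _ (by omega)).mpr (by rw [← hT]; omega))
      rw [List.take_of_length_le (by omega), List.take_of_length_le (by omega)]

theorem inner_full (lst : List Int) (s : Int) (r0 : List Int) (hs : 0 ≤ s)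
    (hle : s.toNat ≤ lst.length) :
    (PySem.List.pyRange s (lst.length : Int) 1).foldl (fun res d =>
      if primCheck (PySem.List.slice lst (some s) (some (d + 1))) then
        if d - s + 1 > (res.length : Int) then PySem.List.slice lst (some s) (some (d + 1)) else res
      else res) r0
    = sel r0 ((lst.drop s.toNat).takeWhile okA) := by
  have h := inner_lemma lst (lst.length - s.toNat) s r0 hs (by omega)
  rw [show s + ((lst.length - s.toNat : Nat) : Int) = (lst.length : Int) by omega] at h
  rw [h, List.take_of_length_le]
  have h1 : ((lst.drop s.toNat).takeWhile okA).length ≤ (lst.drop s.toNat).length :=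
    (List.takeWhile_prefix okA).length_le
  simpa using h1

theorem outer_lemma (lst : List Int) (m : Nat) : ∀ (a : Int) (r0 : List Int), 0 ≤ a →
    a.toNat + m = lst.length →
    (PySem.List.pyRange a (lst.length : Int) 1).foldl (fun res s =>
      (PySem.List.pyRange s (lst.length : Int) 1).foldl (fun res d =>
        if primCheck (PySem.List.slice lst (some s) (some (d + 1))) then
          if d - s + 1 > (res.length : Int) then PySem.List.slice lst (some s) (some (d + 1)) else res
        else res) res) r0
    = sel r0 (can okA (lst.drop a.toNat)) := by
  induction m with
  | zero =>
    intro a r0 ha hm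
    rw [PySem.List.pyRange_one_eq_nil (by omega), List.foldl_nil,
      List.drop_eq_nil_of_le (by omega)]
    rw [show can okA [] = [] from rfl, sel_nil_right]
  | succ m ih =>
    intro a r0 ha hm
    have hlt : a < (lst.length : Int) := by omega
    rw [PySem.List.pyRange_one_cons hlt, List.foldl_cons, inner_full lst a r0 ha (by omega),
      ih (a + 1) _ (by omega) (by omega), show (a + 1).toNat = a.toNat + 1 by omega, sel_assoc]
    congr 1
    rw [List.drop_eq_getElem_cons (show a.toNat < lst.length by omega)]
    rfl

theorem a_eq_can (lst : List Int) : get_longest_prime_digits lst = can okA lst := by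
  show (PySem.List.pyRange 0 (lst.length : Int) 1).foldl (fun res s =>
    (PySem.List.pyRange s (lst.length : Int) 1).foldl (fun res d =>
      if primCheck (PySem.List.slice lst (some s) (some (d + 1))) then
        if d - s + 1 > (res.length : Int) then PySem.List.slice lst (some s) (some (d + 1)) else res
      else res) res) [] = can okA lst
  rw [outer_lemma lst lst.length 0 [] le_rfl (by simp), sel_nil_left]
  simp

-- ===== VERDICT (by name: the statements are the Claim_ definitions above) =====
theorem get_longest_prime_digits_spec : Claim_unchanged_get_longest_prime_digits := by
  intro lst _
  unfold Spec_get_longest_prime_digits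
  intro hD
  rw [a_eq_can, alt_eq_can]
  exact can_congr okA unitsPrime lst (fun x hx => by
    have hx0 : x ≠ 0 := fun h => hD (show (0:Int) ∈ lst from h ▸ hx)
    simp [okA, hx0])

theorem get_longest_prime_digits_changed : Claim_changed_get_longest_prime_digits := by
  unfold Claim_changed_get_longest_prime_digits; decide
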